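-- pv_equiv track=rewrite | github.com/sanyiss/data_science | main/featurescaling.py | find_list_max_min
-- ===== SOURCE A (Python) =====
-- def find_list_max_min(dataset):
--     max_min = list()
--     for i in range(len(dataset[0])):
--         col_values = [row[i] for row in dataset]
--         max_val = max(col_values)
--         min_val = min(col_values)
--         max_min.append([max_val, min_val])
--     return max_min
-- ===== SOURCE B (Python) =====
-- def find_list_max_min(dataset):
--     # single row-major pass keeping running (max, min) per column
--     ext = [(v, v) for v in dataset[0]]
--     for row in dataset[1:]:
--         ext = [(v if v > mx else mx, v if v < mn else mn)
--                for (mx, mn), v in zip(ext, row)]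
--     return [[mx, mn] for mx, mn in ext]
-- ===== Notes on version B (the rewrite author's own statement) =====
-- stated objective: alternative
-- what changed: Instead of materializing each column and calling max/min per column (column-major, r passes over the data plus a list build per column), B makes one row-major pass maintaining a running (max, min) pair per column, seeded from the first row.
import Mathlib
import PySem

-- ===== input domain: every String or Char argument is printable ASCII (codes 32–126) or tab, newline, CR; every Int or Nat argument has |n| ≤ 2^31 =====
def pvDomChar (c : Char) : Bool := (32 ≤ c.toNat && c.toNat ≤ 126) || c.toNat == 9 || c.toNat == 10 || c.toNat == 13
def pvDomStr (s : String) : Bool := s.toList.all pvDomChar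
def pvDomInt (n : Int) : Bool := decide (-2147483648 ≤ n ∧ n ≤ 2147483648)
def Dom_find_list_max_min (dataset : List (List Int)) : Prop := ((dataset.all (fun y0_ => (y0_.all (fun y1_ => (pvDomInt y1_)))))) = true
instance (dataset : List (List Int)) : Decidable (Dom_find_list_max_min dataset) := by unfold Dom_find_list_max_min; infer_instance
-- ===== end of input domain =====

-- B replaces A's per-column extraction with a single row-major pass keeping a running (max, min)
-- pair per column (objective: alternative decomposition, same asymptotic cost).

-- ===== PORT A =====
def find_list_max_min (dataset : List (List Int)) : List (List Int) :=
  -- for i in range(len(dataset[0])): … max_min.append([max(col), min(col)])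
  (PySem.List.pyRange 0 (((PySem.List.pyGet? dataset 0).getD []).length : Int) 1).foldl
    (fun max_min i =>
      let col_values := dataset.map (fun row => (PySem.List.pyGet? row i).getD 0)
      let max_val := (PySem.List.max? col_values (fun y => y)).getD 0
      let min_val := (PySem.List.min? col_values (fun y => y)).getD 0
      max_min ++ [[max_val, min_val]]) []

-- ===== PORT B =====
def find_list_max_min_alt (dataset : List (List Int)) : List (List Int) :=
  match dataset with
  | [] => []  -- Python B raises IndexError here; excluded by Pre_
  | first :: rest =>
    (rest.foldl (fun ext row =>
        (ext.zip row).map (fun p =>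
          (if p.2 > p.1.1 then p.2 else p.1.1, if p.2 < p.1.2 then p.2 else p.1.2)))
      (first.map (fun v => (v, v)))).map (fun p => [p.1, p.2])

-- ===== PRECONDITION & SPEC =====
-- Pre_ excludes exactly the inputs on which A raises IndexError: the empty dataset, and
-- datasets containing a row shorter than the first row.
def Pre_find_list_max_min (dataset : List (List Int)) : Prop :=
  dataset ≠ [] ∧ ∀ row ∈ dataset, (dataset.headD []).length ≤ row.length
instance (dataset : List (List Int)) : Decidable (Pre_find_list_max_min dataset) := by
  unfold Pre_find_list_max_min; infer_instance
def pvWitness_find_list_max_min : List (List Int) := [[1, 5, 3], [4, 2, 6], [0, 9, -1]]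

def Spec_find_list_max_min (dataset : List (List Int)) (out : List (List Int)) : Prop :=
  out = find_list_max_min_alt dataset
instance (dataset : List (List Int)) (out : List (List Int)) : Decidable (Spec_find_list_max_min dataset out) := by
  unfold Spec_find_list_max_min; infer_instance

-- ===== CLAIM (what is proved, stated in full; the proofs are below) =====
def Claim_equal_find_list_max_min : Prop :=
  ∀ (dataset : List (List Int)), Dom_find_list_max_min dataset →
    Pre_find_list_max_min dataset →
    Spec_find_list_max_min dataset (find_list_max_min dataset)

-- ===== LEMMAS AND PROOFS =====

-- B's inner loop body, named for the proofs
def pvStep (ext : List (Int × Int)) (row : List Int) : List (Int × Int) :=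
  (ext.zip row).map (fun p =>
    (if p.2 > p.1.1 then p.2 else p.1.1, if p.2 < p.1.2 then p.2 else p.1.2))

lemma pv_ite_gt_max (a b : Int) : (if b > a then b else a) = max a b := by
  rcases le_total a b with h | h <;> simp [h] <;> omega

lemma pv_ite_lt_min (a b : Int) : (if b < a then b else a) = min a b := by
  rcases le_total a b with h | h <;> simp [h] <;> omega

lemma pv_foldl_append_singleton {α β : Type} (g : α → β) :
    ∀ (l : List α) (init : List β),
      l.foldl (fun acc x => acc ++ [g x]) init = init ++ l.map g := by
  intro l
  induction l with
  | nil => simp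
  | cons x t ih => intro init; simp [List.foldl_cons, ih, List.append_assoc]

lemma pv_range_map_getD {α : Type} (xs : List α) (d : α) :
    (List.range xs.length).map (fun k => xs.getD k d) = xs := by
  apply List.ext_getElem
  · simp
  · intro k h1 h2
    simp [List.getD_eq_getElem?_getD, List.getElem?_eq_getElem h2]

lemma pvStep_length (ext : List (Int × Int)) (row : List Int)
    (h : ext.length ≤ row.length) : (pvStep ext row).length = ext.length := by
  simp [pvStep]
  omega

lemma pvStep_getD (ext : List (Int × Int)) (row : List Int)
    (h : ext.length ≤ row.length) (k : Nat) (hk : k < ext.length) :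
    (pvStep ext row).getD k (0, 0) =
      (max (ext.getD k (0, 0)).1 (row.getD k 0), min (ext.getD k (0, 0)).2 (row.getD k 0)) := by
  have hkr : k < row.length := lt_of_lt_of_le hk h
  have hkz : k < (ext.zip row).length := by simp; omega
  simp [pvStep, List.getD_eq_getElem?_getD, hk, hkr,
    pv_ite_gt_max, pv_ite_lt_min]

lemma pv_foldB (rows : List (List Int)) :
    ∀ (ext : List (Int × Int)), (∀ r ∈ rows, ext.length ≤ r.length) →
      rows.foldl pvStep ext
        = (List.range ext.length).map (fun k =>
            (rows.foldl (fun a r => max a (r.getD k 0)) (ext.getD k (0, 0)).1,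
             rows.foldl (fun a r => min a (r.getD k 0)) (ext.getD k (0, 0)).2)) := by
  induction rows with
  | nil =>
    intro ext _
    have := pv_range_map_getD ext ((0 : Int), (0 : Int))
    simp only [List.foldl_nil]
    conv_lhs => rw [← this]
  | cons r rs ih =>
    intro ext h
    have hr : ext.length ≤ r.length := h r (by simp)
    have hlen : (pvStep ext r).length = ext.length := pvStep_length ext r hr
    have hrs : ∀ r' ∈ rs, (pvStep ext r).length ≤ r'.length := by
      intro r' hr'; rw [hlen]; exact h r' (by simp [hr'])
    rw [List.foldl_cons, ih (pvStep ext r) hrs, hlen]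
    apply List.map_congr_left
    intro k hk
    have hk' : k < ext.length := by simpa using hk
    rw [pvStep_getD ext r hr k hk']
    simp

-- characterization of B on a nonempty dataset
lemma pv_charB (first : List Int) (rest : List (List Int))
    (h : ∀ r ∈ rest, first.length ≤ r.length) :
    find_list_max_min_alt (first :: rest)
      = (List.range first.length).map (fun k =>
          [rest.foldl (fun a r => max a (r.getD k 0)) (first.getD k 0),
           rest.foldl (fun a r => min a (r.getD k 0)) (first.getD k 0)]) := by
  have hinit : (first.map (fun v => (v, v))).length = first.length := by simp
  have h' : ∀ r ∈ rest, (first.map (fun v => (v, v))).length ≤ r.length := by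
    intro r hr; rw [hinit]; exact h r hr
  show (rest.foldl pvStep (first.map (fun v => (v, v)))).map (fun p => [p.1, p.2]) = _
  rw [pv_foldB rest _ h', hinit, List.map_map]
  apply List.map_congr_left
  intro k hk
  have hk' : k < first.length := by simpa using hk
  have hkd : (first.map (fun v => (v, v))).getD k (0, 0) = (first.getD k 0, first.getD k 0) := by
    simp [List.getD_eq_getElem?_getD, hk']
  simp only [Function.comp_def, hkd]

-- characterization of A on a nonempty dataset
lemma pv_charA (first : List Int) (rest : List (List Int)) :
    find_list_max_min (first :: rest)
      = (List.range first.length).map (fun k =>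
          [rest.foldl (fun a r => max a (r.getD k 0)) (first.getD k 0),
           rest.foldl (fun a r => min a (r.getD k 0)) (first.getD k 0)]) := by
  unfold find_list_max_min
  have hget : (PySem.List.pyGet? (first :: rest) 0).getD [] = first := by
    simp
  rw [hget, PySem.List.pyRange_one]
  have hn : ((first.length : Int) - 0).toNat = first.length := by omega
  rw [hn, List.foldl_map, pv_foldl_append_singleton, List.nil_append]
  apply List.map_congr_left
  intro k _
  have hcol : (first :: rest).map (fun row => (PySem.List.pyGet? row ((0 : Int) + (k : Int))).getD 0)
      = (first.getD k 0) :: rest.map (fun row => row.getD k 0) := by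
    simp [PySem.List.pyGet?_natCast, List.getD_eq_getElem?_getD]
  rw [hcol, PySem.List.max?_id_cons, PySem.List.min?_id_cons]
  simp [List.foldl_map]

-- ===== VERDICT (by name: the statement is the Claim_ definition above) =====
theorem find_list_max_min_spec : Claim_equal_find_list_max_min := by
  intro dataset _ hpre
  obtain ⟨hne, hrows⟩ := hpre
  match dataset with
  | [] => exact absurd rfl hne
  | first :: rest =>
    have h : ∀ r ∈ rest, first.length ≤ r.length := by
      intro r hr
      have := hrows r (by simp [hr])
      simpa using this
    show find_list_max_min (first :: rest) = find_list_max_min_alt (first :: rest)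
    rw [pv_charA, pv_charB first rest h]
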